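-- pv_equiv track=rewrite | github.com/whearn17/dtparse | parse_file_listings.py | find_file_or_directory_name_start_position
-- ===== SOURCE A (Python) =====
-- def find_file_or_directory_name_start_position(line: str, ignore_characters: str) -> int:
--     """
--     Returns the index where the actual file/directory name starts in a given line,
--     ignoring any leading characters that are in 'ignore_characters'.
--     """
--     count = 0
--     for char in line:
--         if char in ignore_characters:
--             count += 1
--         else:
--             return count
--     return count
-- ===== SOURCE B (Python) =====
-- def find_file_or_directory_name_start_position(line: str, ignore_characters: str) -> int:
--     """
--     Returns the index where the actual file/directory name starts in a given line,
--     ignoring any leading characters that are in 'ignore_characters'.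
--     """
--     keep = [i for i, ch in enumerate(line) if ch not in ignore_characters]
--     return min(keep, default=len(line))
-- ===== Notes on version B (the rewrite author's own statement) =====
-- stated objective: alternative
-- what changed: Instead of an early-exit counting loop over the leading prefix, B makes a full pass collecting the indices of all characters not in ignore_characters and returns the minimum such index (default len(line)); correct because the first non-ignored position is exactly the minimum of that index set.
import Mathlib
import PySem

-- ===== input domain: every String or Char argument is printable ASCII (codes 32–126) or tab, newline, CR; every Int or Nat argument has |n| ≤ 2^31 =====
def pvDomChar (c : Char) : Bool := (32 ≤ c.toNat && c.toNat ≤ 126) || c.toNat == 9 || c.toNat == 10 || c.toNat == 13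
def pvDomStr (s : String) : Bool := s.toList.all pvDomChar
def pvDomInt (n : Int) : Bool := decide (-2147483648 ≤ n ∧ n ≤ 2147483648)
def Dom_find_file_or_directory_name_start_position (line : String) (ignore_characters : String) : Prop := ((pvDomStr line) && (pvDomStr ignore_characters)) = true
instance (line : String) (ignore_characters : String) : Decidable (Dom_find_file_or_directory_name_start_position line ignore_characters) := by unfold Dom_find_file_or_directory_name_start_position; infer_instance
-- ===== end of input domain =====

-- B replaces A's early-exit counting loop with a full pass collecting indices of non-ignored characters and a min-reduction (default len(line)).


-- ===== PORT A =====
-- the for-loop of A: count leading chars that are in ignore_characters; return at the first other char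
def pvLoopA (ig : List Char) : List Char → Int → Int
  | [], count => count
  | c :: rest, count =>
      if ig.contains c then pvLoopA ig rest (count + 1) else count

def find_file_or_directory_name_start_position (line : String) (ignore_characters : String) : Int :=
  pvLoopA ignore_characters.toList line.toList 0

-- ===== PORT B =====
-- keep = [i for i, ch in enumerate(line) if ch not in ignore_characters]; min(keep, default=len(line))
def find_file_or_directory_name_start_position_alt (line : String) (ignore_characters : String) : Int :=
  let keep := (PySem.List.enumerate line.toList).filterMap
      (fun p => if ignore_characters.toList.contains p.2 then none else some p.1)
  match PySem.List.min? keep (fun x => x) with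
  | some m => m
  | none => (line.toList.length : Int)

-- ===== PRECONDITION & SPEC =====
def Spec_find_file_or_directory_name_start_position (line : String) (ignore_characters : String) (out : Int) : Prop := out = find_file_or_directory_name_start_position_alt line ignore_characters
instance (line : String) (ignore_characters : String) (out : Int) : Decidable (Spec_find_file_or_directory_name_start_position line ignore_characters out) := by unfold Spec_find_file_or_directory_name_start_position; infer_instance

-- ===== CLAIM (what is proved, stated in full; the proofs are below) =====
def Claim_equal_find_file_or_directory_name_start_position : Prop := ∀ (line : String) (ignore_characters : String), Dom_find_file_or_directory_name_start_position line ignore_characters → Spec_find_file_or_directory_name_start_position line ignore_characters (find_file_or_directory_name_start_position line ignore_characters)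

-- ===== LEMMAS AND PROOFS =====

-- the index list B keeps, over a raw char list starting at index s
def pvKeep (ig : List Char) (cs : List Char) (s : Int) : List Int :=
  (PySem.List.enumerate cs s).filterMap
    (fun p => if ig.contains p.2 then none else some p.1)

theorem pvKeep_lb (ig cs : List Char) (s : Int) :
    ∀ y ∈ pvKeep ig cs s, s ≤ y := by
  intro y hy
  simp only [pvKeep, List.mem_filterMap] at hy
  obtain ⟨p, hp, hif⟩ := hy
  rw [PySem.List.mem_enumerate_iff] at hp
  obtain ⟨k, hk, rfl⟩ := hp
  by_cases h : cs[k] ∈ ig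
  · simp [h] at hif
  · simp only [h, List.contains_eq_mem, decide_eq_true_eq, if_false,
      Option.some.injEq] at hif
    omega

theorem pvLoopA_eq_min (ig : List Char) (cs : List Char) (s : Int) :
    pvLoopA ig cs s =
      (match PySem.List.min? (pvKeep ig cs s) (fun x => x) with
       | some m => m
       | none => s + (cs.length : Int)) := by
  induction cs generalizing s with
  | nil =>
      have h0 : PySem.List.min? (pvKeep ig [] s) (fun x => x) = none := by
        rw [PySem.List.min?_eq_none_iff]
        simp [pvKeep, PySem.List.enumerate_nil]
      simp [pvLoopA, h0]
  | cons c rest ih =>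
      by_cases h : c ∈ ig
      · have hc : ig.contains c = true := by simpa using h
        have hkeep : pvKeep ig (c :: rest) s = pvKeep ig rest (s + 1) := by
          simp [pvKeep, PySem.List.enumerate_cons, h]
        simp only [pvLoopA, hc, if_pos, hkeep, ih (s + 1), List.length_cons]
        cases hm : PySem.List.min? (pvKeep ig rest (s + 1)) (fun x => x) with
        | some m => rfl
        | none =>
            show s + 1 + (rest.length : Int) = s + ((rest.length + 1 : Nat) : Int)
            push_cast
            omega
      · have hc : ig.contains c = false := by simpa using h
        have hkeep : pvKeep ig (c :: rest) s = s :: pvKeep ig rest (s + 1) := by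
          simp [pvKeep, PySem.List.enumerate_cons, h]
        have hmin : PySem.List.min? (pvKeep ig (c :: rest) s) (fun x => x)
            = some ((pvKeep ig rest (s + 1)).foldl min s) := by
          rw [hkeep]; exact PySem.List.min?_id_cons s (pvKeep ig rest (s + 1))
        have hle := (PySem.List.foldl_min_le (pvKeep ig rest (s + 1)) s).1
        have hfold : (pvKeep ig rest (s + 1)).foldl min s = s := by
          rcases PySem.List.foldl_min_mem (pvKeep ig rest (s + 1)) s with he | hm
          · exact he
          · have := pvKeep_lb ig rest (s + 1) _ hm
            omega
        simp [pvLoopA, h, hmin, hfold]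

-- ===== VERDICT (by name: the statement is the Claim_ definition above) =====
theorem find_file_or_directory_name_start_position_spec : Claim_equal_find_file_or_directory_name_start_position := by
  intro line ig _
  show _ = _
  have hmain := pvLoopA_eq_min ig.toList line.toList 0
  simp only [find_file_or_directory_name_start_position,
    find_file_or_directory_name_start_position_alt, hmain, pvKeep]
  cases PySem.List.min? ((PySem.List.enumerate line.toList 0).filterMap
      (fun p => if ig.toList.contains p.2 then none else some p.1)) (fun x => x) <;> simp
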